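-- pv_equiv track=rewrite | github.com/Surya-K-Ratheesh/PYTHON | CS50P/P_plates.py | no_punctuations
-- ===== SOURCE A (Python) =====
-- def no_punctuations(s):
--     punc = [',','.',' ','/','!','"',':',';']
--     for i in s:
--         for j in punc:
--             if i == j:
--                 return False
--                 break
--     return True
-- ===== SOURCE B (Python) =====
-- def no_punctuations(s):
--     punc = set(',. /!":;')
--     return not (set(s) & punc)
-- ===== Notes on version B (the rewrite author's own statement) =====
-- stated objective: idiomatic
-- what changed: Replaces the nested per-character short-circuit scan over a punctuation list with building the set of characters of s and returning whether its intersection with a precomputed punctuation set is empty.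
import Mathlib
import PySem

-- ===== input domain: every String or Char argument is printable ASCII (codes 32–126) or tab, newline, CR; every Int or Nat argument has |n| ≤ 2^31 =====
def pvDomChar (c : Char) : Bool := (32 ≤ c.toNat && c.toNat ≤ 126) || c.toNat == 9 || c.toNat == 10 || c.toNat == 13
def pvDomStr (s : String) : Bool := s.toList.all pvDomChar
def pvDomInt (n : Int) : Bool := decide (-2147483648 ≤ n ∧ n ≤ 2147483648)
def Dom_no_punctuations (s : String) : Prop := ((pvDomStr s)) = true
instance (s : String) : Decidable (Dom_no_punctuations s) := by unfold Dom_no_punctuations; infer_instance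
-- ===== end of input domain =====

-- B builds the set of characters of s and intersects it with a precomputed punctuation set
-- instead of A's nested per-character scan over a punctuation list (idiomatic restructuring).

-- ===== PORT A =====
-- inner 'for j in punc: if i == j: return False' — some false = early return, none = fell through
def npInner (i : Char) : List Char → Option Bool
  | [] => none
  | j :: rest => if i == j then some false else npInner i rest

-- outer 'for i in s: …; return True'
def npOuter (punc : List Char) : List Char → Bool
  | [] => true
  | i :: rest =>
    match npInner i punc with
    | some b => b
    | none => npOuter punc rest

def no_punctuations (s : String) : Bool :=
  let punc := [',', '.', ' ', '/', '!', '"', ':', ';']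
  npOuter punc s.toList

-- ===== PORT B =====
def no_punctuations_alt (s : String) : Bool :=
  let punc : PySem.Set Char := PySem.Set.ofList (",. /!\":;".toList)
  !(!(PySem.Set.inter (PySem.Set.ofList s.toList) punc).isEmpty)

-- ===== PRECONDITION & SPEC =====
def Spec_no_punctuations (s : String) (out : Bool) : Prop := out = no_punctuations_alt s
instance (s : String) (out : Bool) : Decidable (Spec_no_punctuations s out) := by unfold Spec_no_punctuations; infer_instance

-- ===== CLAIM (what is proved, stated in full; the proofs are below) =====
def Claim_equal_no_punctuations : Prop := ∀ (s : String), Dom_no_punctuations s → Spec_no_punctuations s (no_punctuations s)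

-- ===== LEMMAS AND PROOFS =====

theorem npInner_eq (i : Char) (ps : List Char) :
    npInner i ps = if i ∈ ps then some false else none := by
  induction ps with
  | nil => rfl
  | cons j rest ih =>
    by_cases h : i = j
    · simp [npInner, h]
    · simp [npInner, h, ih]

theorem npOuter_eq (punc l : List Char) :
    npOuter punc l = l.all (fun c => !decide (c ∈ punc)) := by
  induction l with
  | nil => rfl
  | cons c rest ih =>
    simp only [npOuter, npInner_eq, List.all_cons]
    by_cases h : c ∈ punc
    · simp [h]
    · simp [h, ih]

theorem alt_eq (s : String) (punc : List Char) :
    (!(!(PySem.Set.inter (PySem.Set.ofList s.toList) punc).isEmpty))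
      = s.toList.all (fun c => !decide (c ∈ punc)) := by
  simp only [Bool.not_not, PySem.Set.inter]
  rw [Bool.eq_iff_iff]
  simp only [List.isEmpty_iff, List.filter_eq_nil_iff, List.all_eq_true, Bool.not_eq_true',
    PySem.Set.contains, List.contains_eq_mem, PySem.Set.mem_ofList,
    decide_eq_false_iff_not]
  simp

theorem punc_lists_eq :
    PySem.Set.ofList (",. /!\":;".toList) = [',', '.', ' ', '/', '!', '\"', ':', ';'] := by
  decide

-- ===== VERDICT (by name: the statement is the Claim_ definition above) =====
theorem no_punctuations_spec : Claim_equal_no_punctuations := by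
  intro s _
  unfold Spec_no_punctuations no_punctuations no_punctuations_alt
  rw [alt_eq, npOuter_eq, punc_lists_eq]
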